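-- pv_equiv track=rewrite | github.com/OkhotnikovFN/Yandex-Algorithms | trainings_2.0/division_b/hw_3/task_c/c.py | find_uniq_nums
-- ===== SOURCE A (Python) =====
-- from typing import List
--
-- def find_uniq_nums(nums_list: List[str]) -> List[str]:
--     """
--     Функция которая находит уникальные элементы в списке.
--
--     :param nums_list: проверяемый список
--     :type nums_list: List[str]
--
--     :return: список уникальных элементов
--     :rtype: List[str]
--     """
--     nums_dict = {}
--     for num in nums_list:
--         if num in nums_dict:
--             nums_dict[num] += 1
--         else:
--             nums_dict[num] = 1
--
--     uniq_nums = []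
--     for num in nums_list:
--         if nums_dict[num] == 1:
--             uniq_nums.append(num)
--
--     return uniq_nums
-- ===== SOURCE B (Python) =====
-- from typing import List
--
-- def find_uniq_nums(nums_list: List[str]) -> List[str]:
--     uniq_nums = []
--     work = nums_list
--     while work:
--         head, rest = work[0], work[1:]
--         if head not in rest:
--             uniq_nums.append(head)
--         work = [num for num in rest if num != head]
--     return uniq_nums
-- ===== Notes on version B (the rewrite author's own statement) =====
-- stated objective: alternative
-- what changed: B keeps no counts at all: an elimination loop repeatedly takes the head of a shrinking worklist, emits it if no other copy remains, and deletes all of its copies from the worklist.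
import Mathlib
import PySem

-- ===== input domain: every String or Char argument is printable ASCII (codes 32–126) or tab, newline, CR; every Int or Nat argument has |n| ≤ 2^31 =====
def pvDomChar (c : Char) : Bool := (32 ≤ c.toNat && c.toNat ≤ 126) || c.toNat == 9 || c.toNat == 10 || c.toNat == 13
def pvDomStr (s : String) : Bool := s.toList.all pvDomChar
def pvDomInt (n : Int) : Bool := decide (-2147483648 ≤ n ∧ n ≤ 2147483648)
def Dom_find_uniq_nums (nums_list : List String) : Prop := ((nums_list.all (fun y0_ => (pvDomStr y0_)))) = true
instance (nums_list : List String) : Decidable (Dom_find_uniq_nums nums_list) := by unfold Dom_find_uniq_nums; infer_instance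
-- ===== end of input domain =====

-- B replaces A's count-dictionary-then-filter with an elimination loop (emit head if it has no other copy, delete all its copies); alternative algorithm, not faster.


-- ===== PORT A =====
def find_uniq_nums (nums_list : List String) : List String :=
  let nums_dict : PySem.Dict String Int :=
    nums_list.foldl (fun d num =>
      if d.contains num then d.insert num (d.getD num 0 + 1)
      else d.insert num 1) PySem.Dict.empty
  nums_list.foldl (fun acc num =>
    if nums_dict.getD num 0 == 1 then acc ++ [num] else acc) []

-- ===== PORT B =====
-- the while loop of Source B: state = (uniq_nums, work)
def pvAltLoop (uniq_nums : List String) (work : List String) : List String :=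
  match work with
  | [] => uniq_nums
  | head :: rest =>
    pvAltLoop (if rest.contains head then uniq_nums else uniq_nums ++ [head])
      (rest.filter (fun num => num ≠ head))
termination_by work.length
decreasing_by
  simp only [List.length_cons, List.length_unattach]
  exact Nat.lt_succ_of_le (le_trans (List.length_filter_le _ _)
    (le_of_eq (List.length_attach ..)))

def find_uniq_nums_alt (nums_list : List String) : List String :=
  pvAltLoop [] nums_list

-- ===== PRECONDITION & SPEC =====
def Spec_find_uniq_nums (nums_list : List String) (out : List String) : Prop := out = find_uniq_nums_alt nums_list
instance (nums_list : List String) (out : List String) : Decidable (Spec_find_uniq_nums nums_list out) := by unfold Spec_find_uniq_nums; infer_instance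

-- ===== CLAIM (what is proved, stated in full; the proofs are below) =====
def Claim_equal_find_uniq_nums : Prop := ∀ (nums_list : List String), Dom_find_uniq_nums nums_list → Spec_find_uniq_nums nums_list (find_uniq_nums nums_list)

-- ===== LEMMAS AND PROOFS =====

-- A's counting loop is the standard counter fold: the contains-branch collapses
-- because getD of an absent key is 0.
theorem pv_getD_branch (d : PySem.Dict String Int) (num : String) :
    (if d.contains num then d.insert num (d.getD num 0 + 1) else d.insert num 1)
    = d.insert num (d.getD num 0 + 1) := by
  by_cases h : d.contains num
  · simp [h]
  · have h0 : d.get? num = none := (PySem.Dict.get?_eq_none_iff_contains d num).mpr (by simp [h])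
    simp [h, PySem.Dict.getD, h0]

-- A computes the count-1 filter of the list.
theorem pvA_eq_filter (l : List String) :
    find_uniq_nums l = l.filter (fun num => l.count num == 1) := by
  unfold find_uniq_nums
  have hfold : l.foldl (fun d num =>
      if d.contains num then d.insert num (d.getD num 0 + 1)
      else d.insert num 1) (PySem.Dict.empty : PySem.Dict String Int)
      = l.foldl (fun d num => d.insert num (d.getD num 0 + 1)) PySem.Dict.empty := by
    congr 1
    funext d num
    exact pv_getD_branch d num
  rw [hfold, PySem.Dict.foldl_insert_getD_add_one_eq_counter]
  show List.foldl (fun acc num => if ((PySem.Dict.counter l).getD num 0 == 1) then acc ++ [num] else acc) [] l = _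
  simp only [PySem.Dict.getD_counter, PySem.List.foldl_append_if_eq_filter, List.nil_append]
  congr 1
  funext num
  rw [show ((List.count num l : Int) == 1) = (List.count num l == 1) from by
    cases h : decide ((List.count num l : Int) = 1) <;> simp_all]

-- B's elimination loop computes the same count-1 filter, appended to the accumulator.
theorem pvAltLoop_eq_filter_fuel (n : Nat) : ∀ (work : List String), work.length ≤ n →
    ∀ (uniq : List String),
    pvAltLoop uniq work = uniq ++ work.filter (fun num => work.count num == 1) := by
  induction n with
  | zero =>
    intro work hlen uniq
    have : work = [] := List.eq_nil_of_length_eq_zero (Nat.le_zero.mp hlen)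
    subst this; simp [pvAltLoop]
  | succ n ih =>
    intro work hlen uniq
    match work with
    | [] => simp [pvAltLoop]
    | head :: rest =>
    have hle : (rest.filter (fun num => num ≠ head)).length ≤ n := by
      have := List.length_filter_le (fun num => decide (num ≠ head)) rest
      simp only [List.length_cons] at hlen
      omega
    rw [pvAltLoop, ih _ hle]
    have hrest : rest.filter (fun num => (head :: rest).count num == 1)
        = (rest.filter (fun num => num ≠ head)).filter
            (fun num => (rest.filter (fun n => n ≠ head)).count num == 1) := by
      rw [List.filter_filter]
      apply List.filter_congr
      intro y hy
      by_cases hyx : y = head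
      · subst hyx
        have : 1 ≤ rest.count y := List.one_le_count_iff.mpr hy
        simp
        omega
      · have hxy : ¬ head = y := fun h => hyx h.symm
        have h1 : (head :: rest).count y = rest.count y := by
          simp [hxy]
        have h2 : (rest.filter (fun n => n ≠ head)).count y = rest.count y :=
          List.count_filter (by simp [hyx])
        simp [h1, hyx]
    by_cases hc : rest.contains head
    · have hin : head ∈ rest := by simpa using hc
      have hcnt : ¬ ((head :: rest).count head == 1) = true := by
        have : 1 ≤ rest.count head := List.one_le_count_iff.mpr hin
        simp
        omega
      simp only [hc, if_pos, List.filter_cons]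
      rw [if_neg hcnt, ← hrest]
    · have hnin : head ∉ rest := by simpa using hc
      have hcnt : ((head :: rest).count head == 1) = true := by
        have : rest.count head = 0 := List.count_eq_zero.mpr hnin
        simp [this]
      simp only [hc, if_neg, List.filter_cons, Bool.false_eq_true, not_false_eq_true]
      rw [if_pos hcnt, ← hrest]
      simp

-- ===== VERDICT (by name: the statement is the Claim_ definition above) =====
theorem find_uniq_nums_spec : Claim_equal_find_uniq_nums := by
  intro nums_list _
  unfold Spec_find_uniq_nums find_uniq_nums_alt
  rw [pvA_eq_filter, pvAltLoop_eq_filter_fuel nums_list.length nums_list (Nat.le_refl _)]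
  simp
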